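-- pv_equiv track=rewrite | github.com/shinnosukeono/cpuex2023-group8 | simulator/submit2/compiler/transform/closure/linearscan.py | find_free_reg
-- ===== SOURCE A (Python) =====
-- from collections.abc import Mapping, MutableMapping, Sequence
--
-- def find_free_reg(free_pos: Mapping[int, int], reg_needed_until: int, interval_to: int, hint_reg: int | None):
--     min_full_reg = None
--     max_partial_reg = None
--     for i, pos in free_pos.items():
--         if pos >= interval_to:
--             if min_full_reg is None or i == hint_reg or (pos < free_pos[min_full_reg] and min_full_reg != hint_reg):
--                 min_full_reg = i
--         elif pos > reg_needed_until:
--             if max_partial_reg is None or i == hint_reg or (pos > free_pos[max_partial_reg] and max_partial_reg != hint_reg):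
--                 max_partial_reg = i
--     if min_full_reg is not None:
--         return min_full_reg, False
--     if max_partial_reg is not None:
--         return max_partial_reg, True
--     return None, None
-- ===== SOURCE B (Python) =====
-- def find_free_reg(free_pos, reg_needed_until, interval_to, hint_reg):
--     full = {i: p for i, p in free_pos.items() if p >= interval_to}
--     part = {i: p for i, p in free_pos.items() if reg_needed_until < p < interval_to}
--     if full:
--         if hint_reg in full:
--             return hint_reg, False
--         return min(full.items(), key=lambda kv: kv[1])[0], False
--     if part:
--         if hint_reg in part:
--             return hint_reg, True
--         return max(part.items(), key=lambda kv: kv[1])[0], True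
--     return None, None
-- ===== Notes on version B (the rewrite author's own statement) =====
-- stated objective: simpler
-- what changed: Replaces the single fold that interleaves two conditional running-extremum updates (with hint overrides and dict re-lookups) by bucketing the registers into two dicts in one comprehension pass each and then selecting with a plain hint-membership test followed by min/max over items; Pre_ only excludes association lists with duplicate keys, which cannot arise from a Python dict.
import Mathlib
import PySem

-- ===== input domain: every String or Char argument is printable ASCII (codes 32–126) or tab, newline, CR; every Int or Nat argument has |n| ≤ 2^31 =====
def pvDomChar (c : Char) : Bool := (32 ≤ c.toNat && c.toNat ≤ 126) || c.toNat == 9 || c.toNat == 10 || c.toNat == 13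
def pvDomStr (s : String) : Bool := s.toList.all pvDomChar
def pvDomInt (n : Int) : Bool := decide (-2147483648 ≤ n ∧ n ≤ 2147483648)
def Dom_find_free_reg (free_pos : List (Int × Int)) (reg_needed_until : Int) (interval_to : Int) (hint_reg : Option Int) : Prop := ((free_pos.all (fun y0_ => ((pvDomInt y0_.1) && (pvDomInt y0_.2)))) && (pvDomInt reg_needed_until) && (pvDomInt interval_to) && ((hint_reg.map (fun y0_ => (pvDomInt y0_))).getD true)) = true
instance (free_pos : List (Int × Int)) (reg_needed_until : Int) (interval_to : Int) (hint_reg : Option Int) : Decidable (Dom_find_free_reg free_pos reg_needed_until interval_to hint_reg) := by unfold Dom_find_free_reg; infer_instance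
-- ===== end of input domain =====

-- B replaces A's single fold with interleaved conditional extremum updates by bucketing into
-- two dicts and a plain hint-check-then-min/max selection (objective: simpler).

-- ===== PORT A =====
-- literal port of A's loop: one fold carrying (min_full_reg, max_partial_reg),
-- with free_pos[·] re-looked-up in the whole dict exactly as the Python does
-- (the '.getD 0' only totalises the lookup; it is reached only behind the isNone guard
-- or with a key taken from free_pos itself).
def find_free_reg (free_pos : List (Int × Int)) (reg_needed_until : Int) (interval_to : Int) (hint_reg : Option Int) : Option Int × Option Bool :=
  let st := free_pos.foldl (fun (st : Option Int × Option Int) (ip : Int × Int) =>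
    if ip.2 ≥ interval_to then
      (if st.1.isNone || (some ip.1 == hint_reg) ||
          (decide (ip.2 < ((PySem.Dict.mk free_pos).get? (st.1.getD 0)).getD 0) && !(st.1 == hint_reg))
       then some ip.1 else st.1, st.2)
    else if ip.2 > reg_needed_until then
      (st.1, if st.2.isNone || (some ip.1 == hint_reg) ||
          (decide (ip.2 > ((PySem.Dict.mk free_pos).get? (st.2.getD 0)).getD 0) && !(st.2 == hint_reg))
       then some ip.1 else st.2)
    else st) (none, none)
  match st.1 with
  | some r => (some r, some false)
  | none =>
    match st.2 with
    | some r => (some r, some true)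
    | none => (none, none)

-- ===== PORT B =====
-- 'hint_reg in full' for an Option hint
def pvHintMem (hint_reg : Option Int) (d : List (Int × Int)) : Bool :=
  match hint_reg with
  | some h => (d.map Prod.fst).contains h
  | none => false

def find_free_reg_alt (free_pos : List (Int × Int)) (reg_needed_until : Int) (interval_to : Int) (hint_reg : Option Int) : Option Int × Option Bool :=
  let full := free_pos.filter (fun p => decide (p.2 ≥ interval_to))
  let part := free_pos.filter (fun p => decide (reg_needed_until < p.2 ∧ p.2 < interval_to))
  if !full.isEmpty then
    if pvHintMem hint_reg full then (hint_reg, some false)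
    else ((PySem.List.min? full Prod.snd).map Prod.fst, some false)
  else if !part.isEmpty then
    if pvHintMem hint_reg part then (hint_reg, some true)
    else ((PySem.List.max? part Prod.snd).map Prod.fst, some true)
  else (none, none)

-- ===== PRECONDITION & SPEC =====
-- Pre_ excludes association lists with duplicate keys, which cannot arise from a Python
-- dict (free_pos is a Mapping in A's signature).
def Pre_find_free_reg (free_pos : List (Int × Int)) (reg_needed_until : Int) (interval_to : Int) (hint_reg : Option Int) : Prop :=
  (free_pos.map Prod.fst).Nodup
instance (free_pos : List (Int × Int)) (reg_needed_until : Int) (interval_to : Int) (hint_reg : Option Int) : Decidable (Pre_find_free_reg free_pos reg_needed_until interval_to hint_reg) := by unfold Pre_find_free_reg; infer_instance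

def pvWitness_find_free_reg : (List (Int × Int)) × Int × Int × Option Int := ([(0, 5), (1, 2)], 0, 3, some 1)

def Spec_find_free_reg (free_pos : List (Int × Int)) (reg_needed_until : Int) (interval_to : Int) (hint_reg : Option Int) (out : Option Int × Option Bool) : Prop := out = find_free_reg_alt free_pos reg_needed_until interval_to hint_reg
instance (free_pos : List (Int × Int)) (reg_needed_until : Int) (interval_to : Int) (hint_reg : Option Int) (out : Option Int × Option Bool) : Decidable (Spec_find_free_reg free_pos reg_needed_until interval_to hint_reg out) := by unfold Spec_find_free_reg; infer_instance

-- ===== CLAIM (what is proved, stated in full; the proofs are below) =====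
def Claim_equal_find_free_reg : Prop := ∀ (free_pos : List (Int × Int)) (reg_needed_until : Int) (interval_to : Int) (hint_reg : Option Int), Dom_find_free_reg free_pos reg_needed_until interval_to hint_reg → Pre_find_free_reg free_pos reg_needed_until interval_to hint_reg → Spec_find_free_reg free_pos reg_needed_until interval_to hint_reg (find_free_reg free_pos reg_needed_until interval_to hint_reg)

-- ===== LEMMAS AND PROOFS =====

-- pair-carrying versions of A's two running selections
def pvSelFStep (hint_reg : Option Int) (s : Option (Int × Int)) (p : Int × Int) : Option (Int × Int) :=
  match s with
  | none => some p
  | some m => if (some p.1 == hint_reg) || (decide (p.2 < m.2) && !(some m.1 == hint_reg)) then some p else some m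

def pvSelPStep (hint_reg : Option Int) (s : Option (Int × Int)) (p : Int × Int) : Option (Int × Int) :=
  match s with
  | none => some p
  | some m => if (some p.1 == hint_reg) || (decide (p.2 > m.2) && !(some m.1 == hint_reg)) then some p else some m

def pvSelF (hint_reg : Option Int) (s : Option (Int × Int)) (l : List (Int × Int)) : Option (Int × Int) :=
  l.foldl (pvSelFStep hint_reg) s

def pvSelP (hint_reg : Option Int) (s : Option (Int × Int)) (l : List (Int × Int)) : Option (Int × Int) :=
  l.foldl (pvSelPStep hint_reg) s

lemma pvLookup_mk {l : List (Int × Int)} (hnd : (l.map Prod.fst).Nodup) {p : Int × Int} (hp : p ∈ l) :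
    (PySem.Dict.mk l).get? p.1 = some p.2 := by
  exact PySem.Dict.get?_of_mem_items (PySem.Dict.mk l) (by simpa using hp)
    (by simpa [PySem.Dict.keys] using hnd)

lemma pvSelFStep_isSome (hint_reg : Option Int) (s : Option (Int × Int)) (p : Int × Int) :
    (pvSelFStep hint_reg s p).isSome := by
  cases s with
  | none => rfl
  | some m =>
    simp only [pvSelFStep]
    split <;> rfl

lemma pvSelPStep_isSome (hint_reg : Option Int) (s : Option (Int × Int)) (p : Int × Int) :
    (pvSelPStep hint_reg s p).isSome := by
  cases s with
  | none => rfl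
  | some m =>
    simp only [pvSelPStep]
    split <;> rfl

-- A's fold, with a general starting state that stores looked-up pairs on the side
lemma pvAchar (fp : List (Int × Int)) (reg_needed_until interval_to : Int) (hint_reg : Option Int) :
    ∀ (t : List (Int × Int)) (s1 s2 : Option (Int × Int)),
    (∀ m, s1 = some m → (PySem.Dict.mk fp).get? m.1 = some m.2) →
    (∀ m, s2 = some m → (PySem.Dict.mk fp).get? m.1 = some m.2) →
    (∀ p ∈ t, (PySem.Dict.mk fp).get? p.1 = some p.2) →
    t.foldl (fun (st : Option Int × Option Int) (ip : Int × Int) =>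
      if ip.2 ≥ interval_to then
        (if st.1.isNone || (some ip.1 == hint_reg) ||
            (decide (ip.2 < ((PySem.Dict.mk fp).get? (st.1.getD 0)).getD 0) && !(st.1 == hint_reg))
         then some ip.1 else st.1, st.2)
      else if ip.2 > reg_needed_until then
        (st.1, if st.2.isNone || (some ip.1 == hint_reg) ||
            (decide (ip.2 > ((PySem.Dict.mk fp).get? (st.2.getD 0)).getD 0) && !(st.2 == hint_reg))
         then some ip.1 else st.2)
      else st) (s1.map Prod.fst, s2.map Prod.fst)
    = ((pvSelF hint_reg s1 (t.filter (fun p => decide (p.2 ≥ interval_to)))).map Prod.fst,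
       (pvSelP hint_reg s2 (t.filter (fun p => decide (reg_needed_until < p.2 ∧ p.2 < interval_to)))).map Prod.fst) := by
  intro t
  induction t with
  | nil => intro s1 s2 _ _ _; simp [pvSelF, pvSelP]
  | cons p t ih =>
    intro s1 s2 h1 h2 hall
    have hp : (PySem.Dict.mk fp).get? p.1 = some p.2 := hall p (List.mem_cons_self)
    have hall' : ∀ q ∈ t, (PySem.Dict.mk fp).get? q.1 = some q.2 :=
      fun q hq => hall q (List.mem_cons_of_mem _ hq)
    simp only [List.foldl_cons, List.filter_cons]
    by_cases hfull : p.2 ≥ interval_to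
    · rw [if_pos hfull]
      have hstep : (if (s1.map Prod.fst).isNone || (some p.1 == hint_reg) ||
            (decide (p.2 < ((PySem.Dict.mk fp).get? ((s1.map Prod.fst).getD 0)).getD 0) && !((s1.map Prod.fst) == hint_reg))
          then some p.1 else s1.map Prod.fst) = (pvSelFStep hint_reg s1 p).map Prod.fst := by
        cases s1 with
        | none => simp [pvSelFStep]
        | some m =>
          have hm := h1 m rfl
          simp only [Option.map_some, Option.isNone_some, Option.getD_some, hm,
            Bool.false_or, pvSelFStep]
          by_cases hc : ((some p.1 == hint_reg) || (decide (p.2 < m.2) && !(some m.1 == hint_reg))) = true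
          · rw [if_pos hc, if_pos (by simpa using hc)]; rfl
          · rw [if_neg hc, if_neg (by simpa using hc)]; rfl
      rw [hstep]
      rw [show (decide (p.2 ≥ interval_to)) = true from by simpa using hfull]
      rw [show (decide (reg_needed_until < p.2 ∧ p.2 < interval_to)) = false from by simp; intro _; omega]
      simp only [pvSelF, List.foldl_cons]
      exact ih (pvSelFStep hint_reg s1 p) s2
        (by intro m hm
            cases s1 with
            | none => simp [pvSelFStep] at hm; subst hm; exact hp
            | some m0 =>
              simp only [pvSelFStep] at hm
              split at hm
              · cases hm; exact hp
              · cases hm; exact h1 _ rfl)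
        h2 hall'
    · rw [if_neg hfull]
      rw [show (decide (p.2 ≥ interval_to)) = false from by simpa using hfull]
      by_cases hpart : p.2 > reg_needed_until
      · rw [if_pos hpart]
        have hstep : (if (s2.map Prod.fst).isNone || (some p.1 == hint_reg) ||
              (decide (p.2 > ((PySem.Dict.mk fp).get? ((s2.map Prod.fst).getD 0)).getD 0) && !((s2.map Prod.fst) == hint_reg))
            then some p.1 else s2.map Prod.fst) = (pvSelPStep hint_reg s2 p).map Prod.fst := by
          cases s2 with
          | none => simp [pvSelPStep]
          | some m =>
            have hm := h2 m rfl
            simp only [Option.map_some, Option.isNone_some, Option.getD_some, hm,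
              Bool.false_or, pvSelPStep]
            by_cases hc : ((some p.1 == hint_reg) || (decide (p.2 > m.2) && !(some m.1 == hint_reg))) = true
            · rw [if_pos hc, if_pos (by simpa using hc)]; rfl
            · rw [if_neg hc, if_neg (by simpa using hc)]; rfl
        rw [hstep]
        rw [show (decide (reg_needed_until < p.2 ∧ p.2 < interval_to)) = true from by simp; omega]
        simp only [pvSelP, List.foldl_cons]
        exact ih s1 (pvSelPStep hint_reg s2 p) h1
          (by intro m hm
              cases s2 with
              | none => simp [pvSelPStep] at hm; subst hm; exact hp
              | some m0 =>
                simp only [pvSelPStep] at hm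
                split at hm
                · cases hm; exact hp
                · cases hm; exact h2 _ rfl)
          hall'
      · rw [if_neg hpart]
        rw [show (decide (reg_needed_until < p.2 ∧ p.2 < interval_to)) = false from by simp; intro h; omega]
        exact ih s1 s2 h1 h2 hall'

lemma pvSelF_isSome (hint_reg : Option Int) :
    ∀ (l : List (Int × Int)) (s : Option (Int × Int)), (s.isSome || !l.isEmpty) = true →
      (pvSelF hint_reg s l).isSome := by
  intro l
  induction l with
  | nil => intro s h; simpa [pvSelF] using h
  | cons p t ih =>
    intro s _
    exact ih (pvSelFStep hint_reg s p) (by simp [pvSelFStep_isSome])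

lemma pvSelP_isSome (hint_reg : Option Int) :
    ∀ (l : List (Int × Int)) (s : Option (Int × Int)), (s.isSome || !l.isEmpty) = true →
      (pvSelP hint_reg s l).isSome := by
  intro l
  induction l with
  | nil => intro s h; simpa [pvSelP] using h
  | cons p t ih =>
    intro s _
    exact ih (pvSelPStep hint_reg s p) (by simp [pvSelPStep_isSome])

lemma pvSelF_keep (h : Int) :
    ∀ (l : List (Int × Int)) (m : Int × Int), m.1 = h → (∀ q ∈ l, q.1 ≠ h) →
      pvSelF (some h) (some m) l = some m := by
  intro l
  induction l with
  | nil => intro m _ _; rfl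
  | cons p t ih =>
    intro m hm hq
    have hstep : pvSelFStep (some h) (some m) p = some m := by
      have h1 : (some p.1 == some h) = false := by
        simp; exact hq p List.mem_cons_self
      have h2 : (some m.1 == some h) = true := by simp [hm]
      simp [pvSelFStep, h1, h2]
    show List.foldl (pvSelFStep (some h)) (pvSelFStep (some h) (some m) p) t = some m
    rw [hstep]
    exact ih m hm (fun q hq' => hq q (List.mem_cons_of_mem _ hq'))

lemma pvSelP_keep (h : Int) :
    ∀ (l : List (Int × Int)) (m : Int × Int), m.1 = h → (∀ q ∈ l, q.1 ≠ h) →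
      pvSelP (some h) (some m) l = some m := by
  intro l
  induction l with
  | nil => intro m _ _; rfl
  | cons p t ih =>
    intro m hm hq
    have hstep : pvSelPStep (some h) (some m) p = some m := by
      have h1 : (some p.1 == some h) = false := by
        simp; exact hq p List.mem_cons_self
      have h2 : (some m.1 == some h) = true := by simp [hm]
      simp [pvSelPStep, h1, h2]
    show List.foldl (pvSelPStep (some h)) (pvSelPStep (some h) (some m) p) t = some m
    rw [hstep]
    exact ih m hm (fun q hq' => hq q (List.mem_cons_of_mem _ hq'))

lemma pvSelF_hint (h : Int) :
    ∀ (l : List (Int × Int)) (s : Option (Int × Int)), h ∈ l.map Prod.fst → (l.map Prod.fst).Nodup →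
      (pvSelF (some h) s l).map Prod.fst = some h := by
  intro l
  induction l with
  | nil => intro s hm _; simp at hm
  | cons p t ih =>
    intro s hm hnd
    simp only [List.map_cons, List.nodup_cons] at hnd
    by_cases hph : p.1 = h
    · have hstep : pvSelFStep (some h) s p = some p := by
        cases s with
        | none => rfl
        | some m => simp [pvSelFStep, hph]
      show (List.foldl (pvSelFStep (some h)) (pvSelFStep (some h) s p) t).map Prod.fst = some h
      rw [hstep]
      have hkeep : pvSelF (some h) (some p) t = some p := by
        apply pvSelF_keep h t p hph
        intro q hq hqh
        apply hnd.1
        rw [hph, ← hqh]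
        exact List.mem_map_of_mem hq
      rw [show List.foldl (pvSelFStep (some h)) (some p) t = pvSelF (some h) (some p) t from rfl, hkeep]
      simp [hph]
    · have hm' : h ∈ t.map Prod.fst := by
        simp only [List.map_cons, List.mem_cons] at hm
        rcases hm with hm | hm
        · exact absurd hm.symm hph
        · exact hm
      exact ih (pvSelFStep (some h) s p) hm' hnd.2

lemma pvSelP_hint (h : Int) :
    ∀ (l : List (Int × Int)) (s : Option (Int × Int)), h ∈ l.map Prod.fst → (l.map Prod.fst).Nodup →
      (pvSelP (some h) s l).map Prod.fst = some h := by
  intro l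
  induction l with
  | nil => intro s hm _; simp at hm
  | cons p t ih =>
    intro s hm hnd
    simp only [List.map_cons, List.nodup_cons] at hnd
    by_cases hph : p.1 = h
    · have hstep : pvSelPStep (some h) s p = some p := by
        cases s with
        | none => rfl
        | some m => simp [pvSelPStep, hph]
      show (List.foldl (pvSelPStep (some h)) (pvSelPStep (some h) s p) t).map Prod.fst = some h
      rw [hstep]
      have hkeep : pvSelP (some h) (some p) t = some p := by
        apply pvSelP_keep h t p hph
        intro q hq hqh
        apply hnd.1
        rw [hph, ← hqh]
        exact List.mem_map_of_mem hq
      rw [show List.foldl (pvSelPStep (some h)) (some p) t = pvSelP (some h) (some p) t from rfl, hkeep]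
      simp [hph]
    · have hm' : h ∈ t.map Prod.fst := by
        simp only [List.map_cons, List.mem_cons] at hm
        rcases hm with hm | hm
        · exact absurd hm.symm hph
        · exact hm
      exact ih (pvSelPStep (some h) s p) hm' hnd.2

lemma pvSelF_no_hint (hint_reg : Option Int) :
    ∀ (l : List (Int × Int)) (s : Option (Int × Int)),
      (∀ p ∈ l, (some p.1 == hint_reg) = false) →
      (∀ m, s = some m → (some m.1 == hint_reg) = false) →
      pvSelF hint_reg s l = l.foldl (fun acc x => match acc with
        | none => some x
        | some m => if x.2 < m.2 then some x else some m) s := by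
  intro l
  induction l with
  | nil => intro s _ _; rfl
  | cons p t ih =>
    intro s hl hs
    have hp : (some p.1 == hint_reg) = false := hl p List.mem_cons_self
    have hl' : ∀ q ∈ t, (some q.1 == hint_reg) = false := fun q hq => hl q (List.mem_cons_of_mem _ hq)
    cases s with
    | none =>
      show pvSelF hint_reg (some p) t = List.foldl _ (some p) t
      exact ih (some p) hl' (fun m hm => by cases hm; exact hp)
    | some m =>
      have hm := hs m rfl
      have hstep : pvSelFStep hint_reg (some m) p = if p.2 < m.2 then some p else some m := by
        simp only [pvSelFStep, hp, hm, Bool.not_false, Bool.and_true, Bool.false_or]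
        by_cases hlt : p.2 < m.2
        · rw [if_pos (by simpa using hlt), if_pos hlt]
        · rw [if_neg (by simpa using hlt), if_neg hlt]
      show List.foldl (pvSelFStep hint_reg) (pvSelFStep hint_reg (some m) p) t
         = List.foldl _ (if p.2 < m.2 then some p else some m) t
      rw [hstep]
      by_cases hlt : p.2 < m.2
      · rw [if_pos hlt]
        exact ih (some p) hl' (fun m' hm' => by cases hm'; exact hp)
      · rw [if_neg hlt]
        exact ih (some m) hl' (fun m' hm' => by cases hm'; exact hm)

lemma pvSelP_no_hint (hint_reg : Option Int) :
    ∀ (l : List (Int × Int)) (s : Option (Int × Int)),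
      (∀ p ∈ l, (some p.1 == hint_reg) = false) →
      (∀ m, s = some m → (some m.1 == hint_reg) = false) →
      pvSelP hint_reg s l = l.foldl (fun acc x => match acc with
        | none => some x
        | some m => if m.2 < x.2 then some x else some m) s := by
  intro l
  induction l with
  | nil => intro s _ _; rfl
  | cons p t ih =>
    intro s hl hs
    have hp : (some p.1 == hint_reg) = false := hl p List.mem_cons_self
    have hl' : ∀ q ∈ t, (some q.1 == hint_reg) = false := fun q hq => hl q (List.mem_cons_of_mem _ hq)
    cases s with
    | none =>
      show pvSelP hint_reg (some p) t = List.foldl _ (some p) t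
      exact ih (some p) hl' (fun m hm => by cases hm; exact hp)
    | some m =>
      have hm := hs m rfl
      have hstep : pvSelPStep hint_reg (some m) p = if m.2 < p.2 then some p else some m := by
        simp only [pvSelPStep, hp, hm, Bool.not_false, Bool.and_true, Bool.false_or]
        by_cases hlt : m.2 < p.2
        · rw [if_pos (by simpa using hlt), if_pos hlt]
        · rw [if_neg (by simpa using hlt), if_neg hlt]
      show List.foldl (pvSelPStep hint_reg) (pvSelPStep hint_reg (some m) p) t
         = List.foldl _ (if m.2 < p.2 then some p else some m) t
      rw [hstep]
      by_cases hlt : m.2 < p.2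
      · rw [if_pos hlt]
        exact ih (some p) hl' (fun m' hm' => by cases hm'; exact hp)
      · rw [if_neg hlt]
        exact ih (some m) hl' (fun m' hm' => by cases hm'; exact hm)

lemma pvMin?_eq_fold (l : List (Int × Int)) :
    PySem.List.min? l Prod.snd = l.foldl (fun acc x => match acc with
      | none => some x
      | some m => if x.2 < m.2 then some x else some m) none := by
  unfold PySem.List.min?
  congr 1
  funext acc x
  cases acc <;> rfl

lemma pvMax?_eq_fold (l : List (Int × Int)) :
    PySem.List.max? l Prod.snd = l.foldl (fun acc x => match acc with
      | none => some x
      | some m => if m.2 < x.2 then some x else some m) none := by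
  unfold PySem.List.max?
  congr 1
  funext acc x
  cases acc <;> rfl

lemma pvNoHintMem (hint_reg : Option Int) (l : List (Int × Int))
    (hmem : pvHintMem hint_reg l = false) :
    ∀ p ∈ l, (some p.1 == hint_reg) = false := by
  intro p hp
  cases hint_reg with
  | none => rfl
  | some h =>
    simp only [pvHintMem, List.contains_eq_mem, decide_eq_false_iff_not] at hmem
    by_contra hb
    rw [Bool.not_eq_false] at hb
    have hph : p.1 = h := by simpa using hb
    exact hmem (hph ▸ List.mem_map_of_mem hp)

lemma pvNodupFilter (fp : List (Int × Int)) (q : Int × Int → Bool)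
    (h : (fp.map Prod.fst).Nodup) : ((fp.filter q).map Prod.fst).Nodup :=
  List.Nodup.sublist (List.Sublist.map Prod.fst (List.filter_sublist)) h

theorem find_free_reg_spec : Claim_equal_find_free_reg := by
  intro fp reg_needed_until interval_to hint_reg _ hpre
  unfold Spec_find_free_reg
  have hA := pvAchar fp reg_needed_until interval_to hint_reg fp none none
    (by intro m hm; cases hm) (by intro m hm; cases hm)
    (fun p hp => pvLookup_mk hpre hp)
  simp only [Option.map_none] at hA
  simp only [find_free_reg, find_free_reg_alt, hA]
  by_cases hfe : (fp.filter (fun p => decide (p.2 ≥ interval_to))).isEmpty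
  · rw [List.isEmpty_iff] at hfe
    rw [hfe]
    by_cases hpe : (fp.filter (fun p => decide (reg_needed_until < p.2 ∧ p.2 < interval_to))).isEmpty
    · rw [List.isEmpty_iff] at hpe
      rw [hpe]
      rfl
    · -- partial bucket non-empty
      have hps : (pvSelP hint_reg none (fp.filter (fun p => decide (reg_needed_until < p.2 ∧ p.2 < interval_to)))).isSome :=
        pvSelP_isSome _ _ _ (by rw [eq_false_of_ne_true hpe]; rfl)
      simp only [pvSelF, List.foldl_nil, Option.map_none, List.isEmpty_nil, Bool.not_false,
        Bool.not_true, if_true, if_false, eq_false_of_ne_true hpe]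
      by_cases hmem : pvHintMem hint_reg (fp.filter (fun p => decide (reg_needed_until < p.2 ∧ p.2 < interval_to))) = true
      · rw [if_pos hmem]
        cases hint_reg with
        | none => simp [pvHintMem] at hmem
        | some h =>
          have hh : h ∈ (fp.filter (fun p => decide (reg_needed_until < p.2 ∧ p.2 < interval_to))).map Prod.fst := by
            simpa [pvHintMem, List.contains_eq_mem] using hmem
          rw [pvSelP_hint h _ none hh (pvNodupFilter fp _ hpre)]
          rfl
      · rw [if_neg hmem]
        rw [pvSelP_no_hint hint_reg _ none
          (pvNoHintMem hint_reg _ (by simpa using hmem)) (by intro m hm; cases hm),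
          ← pvMax?_eq_fold]
        rcases Option.isSome_iff_exists.mp (by
          rw [pvSelP_no_hint hint_reg _ none
            (pvNoHintMem hint_reg _ (by simpa using hmem)) (by intro m hm; cases hm),
            ← pvMax?_eq_fold] at hps; exact hps) with ⟨m, hm⟩
        rw [hm]
        rfl
  · -- full bucket non-empty
    have hfs : (pvSelF hint_reg none (fp.filter (fun p => decide (p.2 ≥ interval_to)))).isSome :=
      pvSelF_isSome _ _ _ (by rw [eq_false_of_ne_true hfe]; rfl)
    rw [if_pos (show (!(List.filter (fun p => decide (p.2 ≥ interval_to)) fp).isEmpty) = true from by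
      rw [eq_false_of_ne_true hfe]; rfl)]
    by_cases hmem : pvHintMem hint_reg (fp.filter (fun p => decide (p.2 ≥ interval_to))) = true
    · rw [if_pos hmem]
      cases hint_reg with
      | none => simp [pvHintMem] at hmem
      | some h =>
        have hh : h ∈ (fp.filter (fun p => decide (p.2 ≥ interval_to))).map Prod.fst := by
          simpa [pvHintMem, List.contains_eq_mem] using hmem
        rw [pvSelF_hint h _ none hh (pvNodupFilter fp _ hpre)]
    · rw [if_neg hmem]
      rw [pvSelF_no_hint hint_reg _ none
        (pvNoHintMem hint_reg _ (by simpa using hmem)) (by intro m hm; cases hm),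
        ← pvMin?_eq_fold]
      rcases Option.isSome_iff_exists.mp (by
        rw [pvSelF_no_hint hint_reg _ none
          (pvNoHintMem hint_reg _ (by simpa using hmem)) (by intro m hm; cases hm),
          ← pvMin?_eq_fold] at hfs; exact hfs) with ⟨m, hm⟩
      rw [hm]
      rfl
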